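-- pv_equiv track=rewrite | github.com/Strannovata/Python_practice | Sem_3_newtasks_31-40/33.py | numberOfOccurrences
-- ===== SOURCE A (Python) =====
-- def numberOfOccurrences(string1, string2):
--     text = ' '
--     count = 0
--     u = 0
--     while u < len(string2):
--         for i in string1:
--             for j in string2:
--                 if i == j:
--                     count += 1
--                     # text += i
--         u +=1
--     return (count // u) // u
-- ===== SOURCE B (Python) =====
-- def numberOfOccurrences(string1, string2):
--     counts = {}
--     for j in string2:
--         counts[j] = counts.get(j, 0) + 1
--     total = 0
--     for i in string1:
--         total += counts.get(i, 0)
--     return total // len(string2)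
-- ===== Notes on version B (the rewrite author's own statement) =====
-- stated objective: faster
-- what changed: Replaced the redundant while-loop over len(string2) wrapping a nested double scan (then dividing twice) by a single frequency dictionary of string2 plus one pass over string1, divided once by len(string2).
import Mathlib
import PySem

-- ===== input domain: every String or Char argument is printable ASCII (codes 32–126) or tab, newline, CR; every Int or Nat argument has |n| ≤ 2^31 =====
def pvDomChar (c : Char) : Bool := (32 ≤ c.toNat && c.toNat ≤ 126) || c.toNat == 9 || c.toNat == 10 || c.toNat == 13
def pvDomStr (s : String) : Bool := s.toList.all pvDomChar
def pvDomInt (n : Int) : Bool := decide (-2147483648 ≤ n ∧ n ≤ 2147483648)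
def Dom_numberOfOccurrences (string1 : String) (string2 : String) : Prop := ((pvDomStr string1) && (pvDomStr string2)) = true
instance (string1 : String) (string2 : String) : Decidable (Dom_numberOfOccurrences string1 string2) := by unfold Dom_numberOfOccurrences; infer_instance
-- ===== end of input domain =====

-- B replaces A's redundant while-loop over len(string2) around a nested double scan (then two divisions)
-- with a frequency dictionary of string2 and one pass over string1, divided once: asymptotically faster.


-- ===== PORT A =====
-- while u < len(string2): for i in string1: for j in string2: if i == j: count += 1 ; u += 1
-- ported as a fold over List.range (len string2) carrying count; u ends at len string2.
def numberOfOccurrences (string1 : String) (string2 : String) : Int :=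
  let count : Int :=
    (List.range string2.toList.length).foldl
      (fun count _ =>
        string1.toList.foldl
          (fun count i =>
            string2.toList.foldl (fun count j => if i == j then count + 1 else count) count)
          count)
      0
  let u : Int := string2.toList.length
  PySem.Int.floordiv (PySem.Int.floordiv count u) u

-- ===== PORT B =====
def numberOfOccurrences_alt (string1 : String) (string2 : String) : Int :=
  let counts : PySem.Dict Char Int :=
    string2.toList.foldl (fun d j => d.insert j (d.getD j 0 + 1)) PySem.Dict.empty
  let total : Int := string1.toList.foldl (fun t i => t + counts.getD i 0) 0
  PySem.Int.floordiv total string2.toList.length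

-- ===== PRECONDITION & SPEC =====
-- Pre_ excludes exactly string2 = "", on which A raises ZeroDivisionError (u stays 0).
def Pre_numberOfOccurrences (string1 : String) (string2 : String) : Prop := string2 ≠ ""
instance (string1 : String) (string2 : String) : Decidable (Pre_numberOfOccurrences string1 string2) := by unfold Pre_numberOfOccurrences; infer_instance
def pvWitness_numberOfOccurrences : String × String := ("ab", "bcb")

def Spec_numberOfOccurrences (string1 : String) (string2 : String) (out : Int) : Prop := out = numberOfOccurrences_alt string1 string2
instance (string1 : String) (string2 : String) (out : Int) : Decidable (Spec_numberOfOccurrences string1 string2 out) := by unfold Spec_numberOfOccurrences; infer_instance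

-- ===== CLAIM (what is proved, stated in full; the proofs are below) =====
def Claim_equal_numberOfOccurrences : Prop := ∀ (string1 : String) (string2 : String), Dom_numberOfOccurrences string1 string2 → Pre_numberOfOccurrences string1 string2 → Spec_numberOfOccurrences string1 string2 (numberOfOccurrences string1 string2)

-- ===== LEMMAS AND PROOFS =====

-- the inner two loops of A add, to their accumulator, the number of matching pairs S
lemma pvInner (s1 s2 : List Char) (c : Int) :
    s1.foldl (fun count i => s2.foldl (fun count j => if i == j then count + 1 else count) count) c
      = c + (s1.map (fun i => (s2.count i : Int))).sum := by
  induction s1 generalizing c with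
  | nil => simp
  | cons x xs ih =>
      simp only [List.foldl_cons, List.map_cons, List.sum_cons, ih]
      rw [show s2.foldl (fun count j => if x == j then count + 1 else count) c
            = c + (s2.count x : Int) by
          rw [← PySem.List.foldl_beq_add_one s2 x c]
          exact PySem.List.foldl_congr_mem _ _ _ _ (fun a y _ => by by_cases h : x = y <;> simp [h, BEq.comm])]
      ring

-- A's while-loop multiplies S by len(string2)
lemma pvOuter (n : Nat) (S : Int) :
    (List.range n).foldl (fun count _ => count + S) 0 = n * S := by
  induction n with
  | zero => simp
  | succ m ih => rw [List.range_succ, List.foldl_append, ih, List.foldl_cons, List.foldl_nil]; push_cast; ring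

-- B's single pass over string1 also sums S
lemma pvTotal (s1 s2 : List Char) :
    s1.foldl (fun t i => t + (s2.foldl (fun d j => d.insert j (d.getD j 0 + 1)) PySem.Dict.empty).getD i 0) 0
      = (s1.map (fun i => (s2.count i : Int))).sum := by
  rw [PySem.List.foldl_add]
  simp [PySem.Dict.getD_foldl_insert_add_one]

-- ===== VERDICT (by name: the statement is the Claim_ definition above) =====
theorem numberOfOccurrences_spec : Claim_equal_numberOfOccurrences := by
  intro s1 s2 _ hpre
  unfold Spec_numberOfOccurrences numberOfOccurrences numberOfOccurrences_alt
  have hn : 0 < s2.toList.length := by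
    rcases Nat.eq_zero_or_pos s2.toList.length with h | h
    · exact absurd (by
        have h2 : s2.toList = [] := List.length_eq_zero_iff.mp h
        have : s2.toList = ("" : String).toList := by simpa using h2
        exact String.toList_inj.mp this) hpre
    · exact h
  have hS : ∀ c : Int,
      (List.range s2.toList.length).foldl
        (fun count _ => s1.toList.foldl
          (fun count i => s2.toList.foldl (fun count j => if i == j then count + 1 else count) count)
          count) c
      = (List.range s2.toList.length).foldl
          (fun count _ => count + (s1.toList.map (fun i => (s2.toList.count i : Int))).sum) c := by
    intro c
    exact PySem.List.foldl_congr_mem _ _ _ _ (fun a _ _ => pvInner s1.toList s2.toList a)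
  simp only [hS, pvOuter, pvTotal]
  set S := (s1.toList.map (fun i => (s2.toList.count i : Int))).sum with hSdef
  have hnz : (0:Int) < (s2.toList.length : Int) := by exact_mod_cast hn
  simp only [PySem.Int.floordiv_eq_ediv_of_pos hnz]
  rw [Int.mul_ediv_cancel_left S (by omega)]
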